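-- pv_equiv track=rewrite | github.com/Mrd278/Codeforces_Java | chef and semi primes.py | check
-- ===== SOURCE A (Python) =====
-- def check(a):
--     c=0
--     for i in range(1,a):
--         if a%i==0:
--             c=int(c+1)
--     if c==2:
--         return True
--     else:
--         return False
-- ===== SOURCE B (Python) =====
-- def check(a):
--     # Count ALL divisors of a by scanning only up to sqrt(a), pairing i with a//i;
--     # a has exactly two proper divisors iff it has exactly three divisors in total.
--     d = 0
--     i = 1
--     while i * i <= a:
--         if a % i == 0:
--             d += 1 if i * i == a else 2
--         i += 1
--     return d == 3
-- ===== Notes on version B (the rewrite author's own statement) =====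
-- stated objective: faster
-- what changed: B counts all divisors by scanning i only up to sqrt(a), adding the paired divisor a//i at the same time, and tests for exactly three total divisors instead of A's full scan of range(1,a) counting proper divisors.
import Mathlib
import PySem

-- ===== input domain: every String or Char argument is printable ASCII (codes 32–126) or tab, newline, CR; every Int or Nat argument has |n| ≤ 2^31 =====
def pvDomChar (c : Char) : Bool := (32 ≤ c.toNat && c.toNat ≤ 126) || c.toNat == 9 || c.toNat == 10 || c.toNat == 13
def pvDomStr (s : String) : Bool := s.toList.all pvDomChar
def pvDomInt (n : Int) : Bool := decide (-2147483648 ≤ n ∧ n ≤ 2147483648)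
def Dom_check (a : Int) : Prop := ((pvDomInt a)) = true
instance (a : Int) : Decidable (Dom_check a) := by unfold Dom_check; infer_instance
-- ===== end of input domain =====

-- B counts all divisors scanning only up to sqrt(a) (pairing i with a//i) and tests
-- for exactly three total divisors; same results as A's O(a) scan, O(sqrt(a)) time.

-- ===== PORT A =====
def check (a : Int) : Bool :=
  let c : Int :=
    (PySem.List.pyRange 1 a 1).foldl
      (fun c i => if PySem.Int.mod a i = 0 then c + 1 else c) 0
  if c = 2 then true else false

-- ===== PORT B =====
-- the while loop of Source B; i : Nat since it starts at 1 and only increases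
def checkAltLoop (a : Int) (i : Nat) (d : Int) : Int :=
  if h : (i : Int) * (i : Int) ≤ a then
    checkAltLoop a (i + 1)
      (if PySem.Int.mod a (i : Int) = 0 then
        d + (if (i : Int) * (i : Int) = a then 1 else 2) else d)
  else d
termination_by a.toNat + 1 - i
decreasing_by
  have h1 : (i : Int) ≤ a ∨ i = 0 := by
    rcases Nat.eq_zero_or_pos i with h0 | h0
    · right; exact h0
    · left
      have hi1 : (1 : Int) ≤ (i : Int) := by exact_mod_cast h0
      nlinarith [hi1, h]
  omega

def check_alt (a : Int) : Bool :=
  decide (checkAltLoop a 1 0 = 3)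

-- ===== PRECONDITION & SPEC =====
def Spec_check (a : Int) (out : Bool) : Prop := out = check_alt a
instance (a : Int) (out : Bool) : Decidable (Spec_check a out) := by unfold Spec_check; infer_instance

-- ===== CLAIM (what is proved, stated in full; the proofs are below) =====
def Claim_equal_check : Prop := ∀ (a : Int), Dom_check a → Spec_check a (check a)

-- ===== LEMMAS AND PROOFS =====

-- A's fold counts the elements of the list satisfying the divisibility test
theorem foldl_count (a : Int) (l : List Int) (c : Int) :
    l.foldl (fun c i => if PySem.Int.mod a i = 0 then c + 1 else c) c
      = c + (l.countP (fun i => decide (PySem.Int.mod a i = 0))) := by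
  induction l generalizing c with
  | nil => simp
  | cons x xs ih =>
    simp only [List.foldl_cons, List.countP_cons, ih]
    by_cases hx : PySem.Int.mod a x = 0 <;> (simp [hx]; try ring)

-- countP over range(1, b) as a Finset.Ico card
theorem countP_pyRange_one (p : Int → Bool) (b : ℕ) :
    (PySem.List.pyRange 1 (b : Int) 1).countP p
      = ((Finset.Ico 1 b).filter (fun k : ℕ => p ((k : Int)) = true)).card := by
  induction b with
  | zero => simp [PySem.List.pyRange_one_eq_nil]
  | succ n ih =>
    rcases Nat.eq_zero_or_pos n with h0 | h0
    · subst h0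
      have h1 : PySem.List.pyRange 1 ((1 : ℕ) : Int) 1 = [] := by
        apply PySem.List.pyRange_one_eq_nil; norm_num
      rw [h1]
      simp
    · have hcast : ((n + 1 : ℕ) : Int) = (n : Int) + 1 := by push_cast; ring
      rw [hcast, PySem.List.pyRange_one_succ_right (by exact_mod_cast h0),
        List.countP_append]
      have hIco : Finset.Ico 1 (n + 1) = insert n (Finset.Ico 1 n) := by
        ext x; simp only [Finset.mem_Ico, Finset.mem_insert]; omega
      rw [hIco, Finset.filter_insert]
      by_cases hp : p (n : Int) = true
      · rw [if_pos hp, Finset.card_insert_of_notMem (by simp)]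
        simp [hp, ih]
      · rw [if_neg hp]
        simp only [List.countP_cons, List.countP_nil]
        simp [hp, ih]

-- weight of a small index in B's loop
def pvW (n k : ℕ) : ℕ := if k ∣ n then (if k * k = n then 1 else 2) else 0

-- B's loop sums pvW over the remaining indices up to sqrt n
theorem checkAltLoop_eq (n : ℕ) : ∀ (i : Nat) (d : Int), 1 ≤ i →
    checkAltLoop (n : Int) i d
      = d + ((∑ k ∈ Finset.Ico i (n.sqrt + 1), pvW n k : ℕ) : Int) := by
  intro i d hi
  induction hn : n.sqrt + 1 - i generalizing i d with
  | zero =>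
    have hgt : ¬ ((i : Int) * (i : Int) ≤ (n : Int)) := by
      intro hle2
      have hnn : i * i ≤ n := by exact_mod_cast hle2
      have hsq : i ≤ n.sqrt := Nat.le_sqrt.mpr hnn
      omega
    rw [checkAltLoop, dif_neg hgt]
    have : Finset.Ico i (n.sqrt + 1) = ∅ := by
      apply Finset.Ico_eq_empty; omega
    simp [this]
  | succ m ih =>
    have hle : i ≤ n.sqrt := by omega
    have hcond : (i : Int) * (i : Int) ≤ (n : Int) := by
      exact_mod_cast Nat.le_sqrt.mp hle
    rw [checkAltLoop, dif_pos hcond]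
    rw [ih (i + 1) _ (by omega) (by omega)]
    have hsplit : (∑ k ∈ Finset.Ico i (n.sqrt + 1), pvW n k)
        = pvW n i + ∑ k ∈ Finset.Ico (i + 1) (n.sqrt + 1), pvW n k :=
      Finset.sum_eq_sum_Ico_succ_bot (by omega) _
    rw [hsplit]
    have hdvd : PySem.Int.mod (n : Int) (i : Int) = 0 ↔ i ∣ n := by
      rw [PySem.Int.mod_eq_zero_iff_dvd]; exact_mod_cast Int.natCast_dvd_natCast
    have hsq : ((i : Int) * (i : Int) = (n : Int)) ↔ i * i = n := by
      exact_mod_cast Iff.rfl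
    have hW : ((pvW n i : ℕ) : Int)
        = if PySem.Int.mod (n : Int) (i : Int) = 0 then
            (if (i : Int) * (i : Int) = (n : Int) then 1 else 2) else 0 := by
      by_cases hd : i ∣ n
      · by_cases hq : i * i = n
        · simp [pvW, hd, hq, hdvd.mpr hd, hsq.mpr hq]
        · rw [if_pos (hdvd.mpr hd), if_neg (fun h => hq (hsq.mp h))]
          simp [pvW, hd, hq]
      · rw [if_neg (fun h => hd (hdvd.mp h))]
        simp [pvW, hd]
    rw [Nat.cast_add, hW]
    by_cases hm : PySem.Int.mod (n : Int) (i : Int) = 0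
    · rw [if_pos hm, if_pos hm]; ring
    · rw [if_neg hm, if_neg hm]; ring

-- pairing: summing pvW over all indices up to sqrt n counts every divisor of n exactly once
theorem sum_pvW_eq_card_divisors (n : ℕ) (hn : 1 ≤ n) :
    ∑ k ∈ Finset.Ico 1 (n.sqrt + 1), pvW n k = n.divisors.card := by
  classical
  have hfil : (Finset.Ico 1 (n.sqrt + 1)).filter (fun k => k ∣ n)
      = n.divisors.filter (fun k => k * k ≤ n) := by
    ext k
    simp only [Finset.mem_filter, Finset.mem_Ico, Nat.mem_divisors]
    constructor
    · rintro ⟨⟨h1, h2⟩, hk⟩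
      exact ⟨⟨hk, by omega⟩, Nat.le_sqrt.mp (by omega)⟩
    · rintro ⟨⟨hk, -⟩, hsq⟩
      have hk1 : 1 ≤ k := Nat.pos_of_dvd_of_pos hk hn
      have := Nat.le_sqrt.mpr hsq
      exact ⟨⟨hk1, by omega⟩, hk⟩
  have h1 : ∑ k ∈ Finset.Ico 1 (n.sqrt + 1), pvW n k
      = ∑ k ∈ (n.divisors.filter (fun k => k * k ≤ n)), (if k * k = n then 1 else 2) := by
    rw [← hfil, Finset.sum_filter]
    apply Finset.sum_congr rfl
    intro k _
    by_cases hd : k ∣ n <;> simp [pvW, hd]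
  rw [h1]
  -- split: ∑ (if k*k = n then 1 else 2) = card small + card strictly-small
  have h2 : ∑ k ∈ (n.divisors.filter (fun k => k * k ≤ n)), (if k * k = n then 1 else 2)
      = (n.divisors.filter (fun k => k * k ≤ n)).card
        + (n.divisors.filter (fun k => ¬ k * k ≤ n)).card := by
    have hbij : (n.divisors.filter (fun k => ¬ k * k ≤ n)).card
        = ((n.divisors.filter (fun k => k * k ≤ n)).filter (fun k => ¬ k * k = n)).card := by
      apply Finset.card_bij' (fun k _ => n / k) (fun k _ => n / k)
      · intro k hk
        simp only [Finset.mem_filter, Nat.mem_divisors] at hk ⊢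
        obtain ⟨⟨hk, hn0⟩, hlt⟩ := hk
        obtain ⟨c, hc⟩ := hk
        have hkpos : 0 < k := Nat.pos_of_dvd_of_pos ⟨c, hc⟩ hn
        have hdivc : n / k = c := by rw [hc, Nat.mul_div_cancel_left _ hkpos]
        have hckn : c < k := by nlinarith
        refine ⟨⟨⟨Nat.div_dvd_of_dvd ⟨c, hc⟩, hn0⟩, ?_⟩, ?_⟩
        · rw [hdivc]; nlinarith
        · rw [hdivc]; nlinarith
      · intro k hk
        simp only [Finset.mem_filter, Nat.mem_divisors] at hk ⊢
        obtain ⟨⟨⟨hk, hn0⟩, hle⟩, hne⟩ := hk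
        obtain ⟨c, hc⟩ := hk
        have hkpos : 0 < k := Nat.pos_of_dvd_of_pos ⟨c, hc⟩ hn
        have hdivc : n / k = c := by rw [hc, Nat.mul_div_cancel_left _ hkpos]
        have hkc : k < c := by
          rcases Nat.lt_or_ge k c with h | h
          · exact h
          · exfalso; rcases Nat.eq_or_lt_of_le h with h' | h'
            · exact hne (by subst h'; omega)
            · nlinarith
        refine ⟨⟨Nat.div_dvd_of_dvd ⟨c, hc⟩, hn0⟩, ?_⟩
        rw [hdivc]; nlinarith
      · intro k hk
        simp only [Finset.mem_filter, Nat.mem_divisors] at hk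
        exact Nat.div_div_self hk.1.1 (by omega)
      · intro k hk
        simp only [Finset.mem_filter, Nat.mem_divisors] at hk
        exact Nat.div_div_self hk.1.1.1 (by omega)
    rw [hbij]
    have hsum : ∀ k : ℕ, (if k * k = n then (1:ℕ) else 2) = 1 + (if ¬ k * k = n then 1 else 0) := by
      intro k; by_cases h : k * k = n <;> simp [h]
    rw [Finset.sum_congr rfl (fun k _ => hsum k), Finset.sum_add_distrib, Finset.sum_const,
      smul_eq_mul, mul_one, Finset.card_filter (fun k => ¬ k * k = n)]
  rw [h2]
  exact Finset.card_filter_add_card_filter_not _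

-- A's count: divisors of n strictly below n are all divisors except n itself
theorem filter_Ico_eq_erase (n : ℕ) (hn : 1 ≤ n) :
    (Finset.Ico 1 n).filter (fun k => k ∣ n) = n.divisors.erase n := by
  ext k
  simp only [Finset.mem_filter, Finset.mem_Ico, Finset.mem_erase, Nat.mem_divisors]
  constructor
  · rintro ⟨⟨h1, h2⟩, hk⟩
    exact ⟨by omega, hk, by omega⟩
  · rintro ⟨hne, hk, hn0⟩
    have h1 : 1 ≤ k := Nat.pos_of_dvd_of_pos hk hn
    have h2 : k ≤ n := Nat.le_of_dvd hn hk
    exact ⟨⟨h1, by omega⟩, hk⟩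

-- bridging helper: a Bool written with if equals a decide of an equivalent proposition
theorem if_eq_decide_of_iff {P Q : Prop} [Decidable P] [Decidable Q] (h : P ↔ Q) :
    (if P then true else false) = decide Q := by
  by_cases hp : P
  · simp [hp, h.mp hp]
  · have hq : ¬ Q := fun q => hp (h.mpr q)
    simp [hp, hq]

-- ===== VERDICT (by name: the statement is the Claim_ definition above) =====
theorem check_spec : Claim_equal_check := by
  intro a _
  unfold Spec_check check check_alt
  rcases Int.lt_or_le a 1 with ha | ha
  · -- a ≤ 0 : both sides are false
    have h1 : PySem.List.pyRange 1 a 1 = [] := PySem.List.pyRange_one_eq_nil (by omega)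
    have h2 : ¬ ((((1 : ℕ)) : Int) * (((1 : ℕ)) : Int) ≤ a) := by push_cast; omega
    rw [checkAltLoop, dif_neg h2]
    simp [h1]
  · -- a ≥ 1
    obtain ⟨n, rfl⟩ : ∃ n : ℕ, a = (n : Int) := ⟨a.toNat, (Int.toNat_of_nonneg (by omega)).symm⟩
    have hn : 1 ≤ n := by exact_mod_cast ha
    rw [foldl_count, checkAltLoop_eq n 1 0 (by omega),
      countP_pyRange_one (fun i => decide (PySem.Int.mod (n : Int) i = 0)) n,
      sum_pvW_eq_card_divisors n hn]
    have hfil : ((Finset.Ico 1 n).filter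
        (fun k : ℕ => (decide (PySem.Int.mod (n : Int) ((k : Int)) = 0)) = true))
        = (Finset.Ico 1 n).filter (fun k : ℕ => k ∣ n) := by
      apply Finset.filter_congr
      intro k _
      simp [Int.natCast_dvd_natCast]
    rw [hfil, filter_Ico_eq_erase n hn,
      Finset.card_erase_of_mem (Nat.mem_divisors.mpr ⟨dvd_refl n, by omega⟩)]
    have hpos : 1 ≤ n.divisors.card :=
      Finset.card_pos.mpr ⟨n, Nat.mem_divisors.mpr ⟨dvd_refl n, by omega⟩⟩
    apply if_eq_decide_of_iff
    omega
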